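-- pv_equiv track=rewrite | github.com/ricardochavezt/adventOfCode2023 | day7.py | sorted_hand
-- ===== SOURCE A (Python) =====
-- def sorted_hand(hand, with_joker=False):
--     sorted_cards = sorted(hand)
--     last_card = ''
--     grouped_cards = []
--     for c in sorted_cards:
--         if last_card != c:
--             grouped_cards.append([])
--         grouped_cards[-1].append(c)
--         last_card = c
--
--     result = [''.join(g) for g in grouped_cards]
--     result.sort(key=lambda r: len(r), reverse=True)
--     if with_joker and len(result) > 1:
--         joker_group_index = -1
--         for (i, g) in enumerate(result):
--             if g[0] == 'J':
--                 joker_group_index = i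
--                 break
--         if joker_group_index != -1:
--             joker_group = result.pop(joker_group_index)
--             result[0] += joker_group
--
--     return result
-- ===== SOURCE B (Python) =====
-- def sorted_hand(hand, with_joker=False):
--     # One group per distinct card, in ascending card order, built from counts
--     # (no sort of the whole hand, no adjacent-run scan).
--     groups = [card * hand.count(card) for card in sorted(set(hand))]
--     groups.sort(key=len, reverse=True)
--     if with_joker and len(groups) > 1:
--         ji = next((i for i, g in enumerate(groups) if g[0] == 'J'), -1)
--         if ji != -1:
--             jg = groups.pop(ji)
--             groups[0] += jg
--     return groups
-- ===== Notes on version B (the rewrite author's own statement) =====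
-- stated objective: idiomatic
-- what changed: B replaces A's sort-the-whole-hand + adjacent-run grouping loop (with the last_card sentinel and grouped_cards[-1] mutation) by a direct construction: one group per distinct card built as card * hand.count(card), distinct cards iterated in ascending order via sorted(set(hand)); the length sort and joker merge are unchanged.
import Mathlib
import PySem

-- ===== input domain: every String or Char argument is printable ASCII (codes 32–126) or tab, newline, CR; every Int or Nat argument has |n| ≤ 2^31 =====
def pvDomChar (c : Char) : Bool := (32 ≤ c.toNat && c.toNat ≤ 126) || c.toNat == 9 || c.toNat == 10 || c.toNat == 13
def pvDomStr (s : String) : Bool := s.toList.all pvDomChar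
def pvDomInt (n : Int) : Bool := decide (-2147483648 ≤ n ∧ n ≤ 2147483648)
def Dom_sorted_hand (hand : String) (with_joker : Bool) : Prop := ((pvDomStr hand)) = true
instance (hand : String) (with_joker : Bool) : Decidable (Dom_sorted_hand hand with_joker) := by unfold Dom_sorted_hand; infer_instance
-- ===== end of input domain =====

-- B replaces A's sort-and-scan run-grouping by one group per distinct card built from counts
-- (card repeated hand.count(card) times, distinct cards in ascending order); idiomatic; a timing run measured it faster on the generated inputs.
-- Strings are kept as List Char through the pipeline; the final ''.join is String.ofList at the end
-- (exact: the joins/concatenations in both Pythons are plain string concatenation of the same chars).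

-- ===== PORT A =====
-- grouped_cards[-1].append(c): append c to the last group. The loop guarantees the list is
-- nonempty at that point (Python would raise IndexError on []).
def pvAppendLast : List (List Char) → Char → List (List Char)
  | [], _ => []
  | [g], c => [g ++ [c]]
  | g :: gs, c => g :: pvAppendLast gs c

-- one iteration of A's grouping loop; state = (grouped_cards, last_card as List Char, '' = [])
def pvStep (st : List (List Char) × List Char) (c : Char) : List (List Char) × List Char :=
  (pvAppendLast (if st.2 ≠ [c] then st.1 ++ [[]] else st.1) c, [c])

-- sorted_cards = sorted(hand); the for-loop grouping adjacent equal cards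
def pvGroupsA (hand : String) : List (List Char) :=
  ((PySem.List.sorted hand.toList (fun c => c) false).foldl pvStep ([], [])).1

def sorted_hand (hand : String) (with_joker : Bool) : List String :=
  let grouped := pvGroupsA hand
  -- result = [''.join(g) for g in grouped]; result.sort(key=len, reverse=True)
  let result := PySem.List.sorted grouped (fun g => g.length) true
  let result :=
    if with_joker && decide (result.length > 1) then
      -- enumerate + break: first index i with result[i][0] == 'J' (groups are nonempty)
      match result.findIdx? (fun g => g.head? == some 'J') with
      | some i =>
        -- joker_group = result.pop(i); result[0] += joker_group
        match PySem.List.pop? result (Int.ofNat i) with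
        | some (jg, rest) =>
          match rest with
          | r0 :: rs => (r0 ++ jg) :: rs
          | [] => []          -- unreachable: len(result) > 1 before the pop
        | none => result      -- unreachable: i is a valid index
      | none => result        -- joker_group_index == -1
    else result
  result.map (fun g => String.ofList g)

-- ===== PORT B =====
-- [card * hand.count(card) for card in sorted(set(hand))]
def pvGroupsB (hand : String) : List (List Char) :=
  (PySem.List.sorted (PySem.Set.ofList hand.toList) (fun c => c) false).map
    (fun card => List.replicate (hand.toList.count card) card)

def sorted_hand_alt (hand : String) (with_joker : Bool) : List String :=
  let groups := pvGroupsB hand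
  -- groups.sort(key=len, reverse=True)
  let groups := PySem.List.sorted groups (fun g => g.length) true
  let groups :=
    if with_joker && decide (groups.length > 1) then
      -- ji = next((i for i, g in enumerate(groups) if g[0] == 'J'), -1)
      match groups.findIdx? (fun g => g.head? == some 'J') with
      | some i =>
        -- jg = groups.pop(ji); groups[0] += jg
        match PySem.List.pop? groups (Int.ofNat i) with
        | some (jg, rest) =>
          match rest with
          | r0 :: rs => (r0 ++ jg) :: rs
          | [] => []          -- unreachable: len(groups) > 1 before the pop
        | none => groups      -- unreachable: ji is a valid index
      | none => groups        -- ji == -1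
    else groups
  groups.map (fun g => String.ofList g)

-- ===== PRECONDITION & SPEC =====
def Spec_sorted_hand (hand : String) (with_joker : Bool) (out : List String) : Prop := out = sorted_hand_alt hand with_joker
instance (hand : String) (with_joker : Bool) (out : List String) : Decidable (Spec_sorted_hand hand with_joker out) := by unfold Spec_sorted_hand; infer_instance

-- ===== CLAIM (what is proved, stated in full; the proofs are below) =====
def Claim_equal_sorted_hand : Prop := ∀ (hand : String) (with_joker : Bool), Dom_sorted_hand hand with_joker → Spec_sorted_hand hand with_joker (sorted_hand hand with_joker)

-- ===== LEMMAS AND PROOFS =====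

-- sorted list with adjacent duplicates removed (proof-side description of A's group heads)
def pvDedup : List Char → List Char
  | [] => []
  | [c] => [c]
  | a :: b :: t => if a = b then pvDedup (b :: t) else a :: pvDedup (b :: t)

theorem pvAppendLast_append_left (xs ys : List (List Char)) (c : Char) (h : ys ≠ []) :
    pvAppendLast (xs ++ ys) c = xs ++ pvAppendLast ys c := by
  induction xs with
  | nil => rfl
  | cons g gs ih =>
    cases gs with
    | nil => cases ys with
      | nil => exact absurd rfl h
      | cons y ys' => simp [pvAppendLast]
    | cons g' gs' => simp [pvAppendLast] at ih ⊢; exact ih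

theorem pvAppendLast_ne_nil (gs : List (List Char)) (c : Char) (h : gs ≠ []) :
    pvAppendLast gs c ≠ [] := by
  match gs with
  | [] => exact absurd rfl h
  | [g] => simp [pvAppendLast]
  | g :: g' :: t => simp [pvAppendLast]

theorem pvFold_replicate (n : Nat) (c : Char) (gs : List (List Char)) (g : List Char) :
    (List.replicate n c).foldl pvStep (gs ++ [g], [c]) = (gs ++ [g ++ List.replicate n c], [c]) := by
  induction n generalizing g with
  | zero => simp
  | succ n ih =>
    rw [List.replicate_succ, List.foldl_cons]
    have hstep : pvStep (gs ++ [g], [c]) c = (gs ++ [g ++ [c]], [c]) := by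
      simp [pvStep, pvAppendLast_append_left gs [g] c (by simp), pvAppendLast]
    rw [hstep, ih (g ++ [c])]
    simp

theorem pvFold_shift (s : List Char) (gs₁ : List (List Char)) :
    ∀ (gs : List (List Char)) (last : List Char), gs ≠ [] →
    (s.foldl pvStep (gs₁ ++ gs, last)).1 = gs₁ ++ (s.foldl pvStep (gs, last)).1 := by
  induction s with
  | nil => intro gs last h; rfl
  | cons c t ih =>
    intro gs last h
    simp only [List.foldl_cons, pvStep]
    by_cases hl : last = [c]
    · simp only [hl, ne_eq, not_true_eq_false, if_false,
        pvAppendLast_append_left gs₁ gs c h]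
      exact ih (pvAppendLast gs c) [c] (pvAppendLast_ne_nil gs c h)
    · simp only [ne_eq, hl, not_false_eq_true, if_true, List.append_assoc]
      rw [pvAppendLast_append_left gs₁ (gs ++ [[]]) c (by simp)]
      exact ih (pvAppendLast (gs ++ [[]]) c) [c] (pvAppendLast_ne_nil _ c (by simp))

theorem pvGroupFold_block (n : Nat) (c : Char) (s' : List Char) (h : s'.head? ≠ some c) :
    ((List.replicate (n+1) c ++ s').foldl pvStep ([], [])).1
      = List.replicate (n+1) c :: (s'.foldl pvStep ([], [])).1 := by
  have h0 : (List.replicate (n+1) c ++ s') = c :: (List.replicate n c ++ s') := by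
    simp [List.replicate_succ]
  rw [h0, List.foldl_cons]
  have hstep : pvStep ([], []) c = ([[c]], [c]) := by simp [pvStep, pvAppendLast]
  have hrep := pvFold_replicate n c [] [c]
  simp only [List.nil_append, List.singleton_append] at hrep
  have h1 : List.replicate (n+1) c = c :: List.replicate n c := rfl
  rw [hstep, List.foldl_append, hrep, h1]
  cases s' with
  | nil => simp
  | cons d t =>
    have hdc : ¬ ([c] : List Char) = [d] := by
      intro he; injection he with he1; exact h (by rw [List.head?_cons, he1])
    have hstep2 : pvStep ([c :: List.replicate n c], [c]) d
        = ([c :: List.replicate n c, [d]], [d]) := by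
      simp [pvStep, hdc, pvAppendLast]
    have hstep3 : pvStep ([], []) d = ([[d]], [d]) := by simp [pvStep, pvAppendLast]
    rw [List.foldl_cons, List.foldl_cons, hstep2, hstep3]
    exact pvFold_shift t [c :: List.replicate n c] [[d]] [d] (by simp)

theorem pvDedup_block (n : Nat) (c : Char) (s' : List Char) (h : s'.head? ≠ some c) :
    pvDedup (List.replicate (n+1) c ++ s') = c :: pvDedup s' := by
  induction n with
  | zero =>
    cases s' with
    | nil => simp [pvDedup]
    | cons d t =>
      have hdc : ¬ c = d := by intro he; exact h (by simp [he])
      simp [pvDedup, hdc]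
  | succ n ih =>
    have h0 : List.replicate (n+1+1) c ++ s' = c :: (List.replicate (n+1) c ++ s') := by
      simp [List.replicate_succ]
    have h1 : List.replicate (n+1) c ++ s' = c :: (List.replicate n c ++ s') := by
      simp [List.replicate_succ]
    rw [h0, h1, pvDedup, if_pos rfl, ← h1, ih]

theorem mem_pvDedup (s : List Char) (x : Char) : x ∈ pvDedup s ↔ x ∈ s := by
  fun_induction pvDedup s with
  | case1 => simp
  | case2 c => simp
  | case3 b t ih => simp only [ih]; simp
  | case4 a b t hab ih => simp [ih]

theorem pvDedup_pairwise_lt (s : List Char) (h : s.Pairwise (· ≤ ·)) :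
    (pvDedup s).Pairwise (· < ·) := by
  fun_induction pvDedup s with
  | case1 => exact List.Pairwise.nil
  | case2 c => simp
  | case3 b t ih => exact ih (h.sublist (List.sublist_cons_self _ _))
  | case4 a b t hab ih =>
    refine List.Pairwise.cons ?_ (ih (h.sublist (List.sublist_cons_self _ _)))
    intro y hy
    have hyt : y ∈ b :: t := (mem_pvDedup (b :: t) y).1 hy
    have hle : ∀ z ∈ b :: t, a ≤ z := fun z hz => (List.pairwise_cons.1 h).1 z hz
    have hbt : (b :: t).Pairwise (· ≤ ·) := (List.pairwise_cons.1 h).2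
    rcases List.mem_cons.1 hyt with rfl | hyt'
    · exact lt_of_le_of_ne (hle y List.mem_cons_self) hab
    · exact lt_of_lt_of_le (lt_of_le_of_ne (hle b List.mem_cons_self) hab)
        ((List.pairwise_cons.1 hbt).1 y hyt')

theorem pvGroupFold_eq_aux (N : Nat) : ∀ s : List Char, s.length ≤ N → s.Pairwise (· ≤ ·) →
    (s.foldl pvStep ([], [])).1 = (pvDedup s).map (fun c => List.replicate (s.count c) c) := by
  induction N with
  | zero =>
    intro s hs _
    have : s = [] := List.eq_nil_of_length_eq_zero (Nat.le_zero.1 hs)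
    subst this; rfl
  | succ N ih =>
    intro s hlen hpw
    cases s with
    | nil => rfl
    | cons c t =>
      have hpcc : (fun x => x == c) c = true := by simp
      have hsplit : (c :: t).takeWhile (fun x => x == c) ++ (c :: t).dropWhile (fun x => x == c)
          = c :: t := List.takeWhile_append_dropWhile
      set tw := (c :: t).takeWhile (fun x => x == c) with htw
      set dw := (c :: t).dropWhile (fun x => x == c) with hdw
      set m := (t.takeWhile (fun x => x == c)).length with hm
      have htw0 : tw = c :: t.takeWhile (fun x => x == c) := by
        rw [htw, List.takeWhile_cons, if_pos hpcc]
      have hlt : tw.length = m + 1 := by rw [htw0]; simp [hm]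
      have htwc : ∀ x ∈ tw, x = c := by
        intro x hx
        have := List.mem_takeWhile_imp (htw ▸ hx)
        simpa using this
      have htwrep : tw = List.replicate tw.length c := List.eq_replicate_of_mem htwc
      have htweq : c :: t = List.replicate (m + 1) c ++ dw := by
        rw [← hlt, ← htwrep, hdw, htw, hsplit]
      have hdwh : dw.head? ≠ some c := by
        have h' := List.head?_dropWhile_not (fun x => x == c) (c :: t)
        rw [← hdw] at h'
        intro he
        rw [he] at h'
        simp at h'
      have hpw2 : (List.replicate (m + 1) c ++ dw).Pairwise (· ≤ ·) := htweq ▸ hpw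
      rcases List.pairwise_append.1 hpw2 with ⟨-, pwdw, hcross⟩
      have hcmem : c ∈ List.replicate (m + 1) c := by simp
      have hcdw : c ∉ dw := by
        intro hcd
        cases hdwe : dw with
        | nil => rw [hdwe] at hcd; simp at hcd
        | cons d t' =>
          have hdc : d ≠ c := by
            intro he
            exact hdwh (by rw [hdwe, List.head?_cons, he])
          rw [hdwe] at hcd
          rcases List.mem_cons.1 hcd with he | hct'
          · exact hdc he.symm
          · have h1 : d ≤ c := (List.pairwise_cons.1 (hdwe ▸ pwdw)).1 c hct'
            have h2 : c ≤ d := hcross c hcmem d (hdwe ▸ List.mem_cons_self)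
            exact hdc (le_antisymm h1 h2)
      have hdwlen : dw.length ≤ N := by
        have := congrArg List.length htweq
        simp at this hlen
        omega
      have ihdw := ih dw hdwlen pwdw
      have hLHS : ((c :: t).foldl pvStep ([], [])).1
          = List.replicate (m + 1) c :: (dw.foldl pvStep ([], [])).1 := by
        rw [htweq]; exact pvGroupFold_block m c dw hdwh
      have hDedup : pvDedup (c :: t) = c :: pvDedup dw := by
        rw [htweq]; exact pvDedup_block m c dw hdwh
      have hcount_c : (c :: t).count c = m + 1 := by
        rw [htweq, List.count_append]
        have h1 : (List.replicate (m + 1) c).count c = m + 1 := by simp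
        have h2 : dw.count c = 0 := List.count_eq_zero.2 hcdw
        omega
      have hcount_d : ∀ d ∈ pvDedup dw, (c :: t).count d = dw.count d := by
        intro d hd
        have hddw : d ∈ dw := (mem_pvDedup dw d).1 hd
        have hdc : d ≠ c := fun he => hcdw (he ▸ hddw)
        rw [htweq, List.count_append, List.count_replicate, if_neg (by simpa using fun he => hdc he.symm)]
        omega
      calc ((c :: t).foldl pvStep ([], [])).1
          = List.replicate (m + 1) c :: (dw.foldl pvStep ([], [])).1 := hLHS
        _ = List.replicate (m + 1) c
              :: (pvDedup dw).map (fun d => List.replicate (dw.count d) d) := by rw [ihdw]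
        _ = (pvDedup (c :: t)).map (fun d => List.replicate ((c :: t).count d) d) := by
              rw [hDedup, List.map_cons, hcount_c]
              congr 1
              symm
              exact List.map_congr_left (fun d hd => by rw [hcount_d d hd])

theorem pvGroupFold_eq (s : List Char) (h : s.Pairwise (· ≤ ·)) :
    (s.foldl pvStep ([], [])).1 = (pvDedup s).map (fun c => List.replicate (s.count c) c) :=
  pvGroupFold_eq_aux s.length s le_rfl h

theorem pvGroups_eq (hand : String) : pvGroupsA hand = pvGroupsB hand := by
  have hpw : (PySem.List.sorted hand.toList (fun c => c) false).Pairwise (· ≤ ·) := by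
    simpa using PySem.List.sorted_pairwise hand.toList (fun c => c)
  have h1 : PySem.List.sorted (PySem.Set.ofList hand.toList) (fun c => c) false
      = pvDedup (PySem.List.sorted hand.toList (fun c => c) false) := by
    apply PySem.List.sorted_eq_of_perm_of_pairwise_lt
    · apply (List.perm_ext_iff_of_nodup ?_ ?_).mpr
      · intro a
        rw [mem_pvDedup, PySem.List.mem_sorted, PySem.Set.mem_ofList]
      · exact List.Pairwise.imp (fun h => ne_of_lt h) (pvDedup_pairwise_lt _ hpw)
      · exact PySem.Set.nodup_ofList hand.toList
    · exact pvDedup_pairwise_lt _ hpw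
  unfold pvGroupsA pvGroupsB
  rw [h1, pvGroupFold_eq _ hpw]
  apply List.map_congr_left
  intro d _
  rw [List.Perm.count_eq (PySem.List.sorted_perm hand.toList (fun c => c) false)]

-- ===== VERDICT (by name: the statement is the Claim_ definition above) =====
theorem sorted_hand_spec : Claim_equal_sorted_hand := by
  intro hand with_joker _
  unfold Spec_sorted_hand sorted_hand sorted_hand_alt
  rw [pvGroups_eq]
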